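-- pv_equiv track=rewrite | github.com/SegreteriaFL/ombreeluci-astro | scripts_and_data/scripts/add_lang_frontmatter.py | set_lang_in_frontmatter
-- ===== SOURCE A (Python) =====
-- def set_lang_in_frontmatter(fm: str, lang: str) -> str:
--     """
--     Aggiunge o sostituisce la chiave lang nel frontmatter (una sola occorrenza).
--     Inserisce dopo 'slug:' se presente, altrimenti in coda.
--     Se esistono più righe 'lang:', le sostituisce con una sola.
--     """
--     lines = fm.rstrip().split("\n")
--     new_lines = []
--     inserted = False
--
--     for line in lines:
--         stripped = line.strip()
--         if stripped.lower().startswith("lang:"):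
--             if not inserted:
--                 indent = line[: len(line) - len(line.lstrip())]
--                 new_lines.append(f"{indent}lang: {lang}")
--                 inserted = True
--             continue
--         new_lines.append(line)
--         if not inserted and "slug:" in line and ":" in line:
--             indent = line[: len(line) - len(line.lstrip())]
--             new_lines.append(f"{indent}lang: {lang}")
--             inserted = True
--
--     if not inserted:
--         if new_lines:
--             indent = "  " if new_lines[-1].startswith(" ") else ""
--             new_lines.append(f"{indent}lang: {lang}")
--         else:
--             new_lines.append(f"lang: {lang}")
--
--     return "\n".join(new_lines) + "\n"
-- ===== SOURCE B (Python) =====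
-- def set_lang_in_frontmatter(fm: str, lang: str) -> str:
--     # Two-phase: locate the first lang/slug line, then splice one lang line
--     # into the lang-free copy of the lines at the computed slot.
--     lines = fm.rstrip().split("\n")
--
--     def is_lang(l):
--         return l.strip().lower().startswith("lang:")
--
--     def indent_of(l):
--         return l[: len(l) - len(l.lstrip())]
--
--     kept = [l for l in lines if not is_lang(l)]
--     i_lang = next((i for i, l in enumerate(lines) if is_lang(l)), None)
--     i_slug = next((i for i, l in enumerate(lines)
--                    if not is_lang(l) and "slug:" in l and ":" in l), None)
--
--     if i_lang is not None and (i_slug is None or i_lang < i_slug):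
--         pos = sum(1 for l in lines[:i_lang] if not is_lang(l))
--         entry = indent_of(lines[i_lang]) + "lang: " + lang
--     elif i_slug is not None:
--         pos = sum(1 for l in lines[:i_slug] if not is_lang(l)) + 1
--         entry = indent_of(lines[i_slug]) + "lang: " + lang
--     else:
--         pos = len(kept)
--         entry = ("  " if kept and kept[-1].startswith(" ") else "") + "lang: " + lang
--
--     return "\n".join(kept[:pos] + [entry] + kept[pos:]) + "\n"
-- ===== Notes on version B (the rewrite author's own statement) =====
-- stated objective: alternative
-- what changed: A's single stateful pass (accumulator plus an 'inserted' flag deciding replace/insert-after/append as it goes) is replaced by a two-phase decomposition: locate the first lang line and the first non-lang slug line, compute one insertion slot and entry, then splice it into the lang-filtered line list.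
import Mathlib
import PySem

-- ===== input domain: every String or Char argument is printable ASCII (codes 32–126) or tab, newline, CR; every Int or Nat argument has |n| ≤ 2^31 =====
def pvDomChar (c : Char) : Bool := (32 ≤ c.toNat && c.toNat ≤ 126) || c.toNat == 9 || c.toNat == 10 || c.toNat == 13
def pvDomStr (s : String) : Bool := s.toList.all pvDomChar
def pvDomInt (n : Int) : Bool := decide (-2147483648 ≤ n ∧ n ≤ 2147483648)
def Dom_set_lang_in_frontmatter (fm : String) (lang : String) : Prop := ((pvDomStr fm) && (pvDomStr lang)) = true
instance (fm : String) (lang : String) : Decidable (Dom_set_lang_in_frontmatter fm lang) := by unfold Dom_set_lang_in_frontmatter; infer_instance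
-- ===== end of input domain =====

-- B replaces A's single stateful loop (accumulator + inserted flag) by a two-phase
-- decomposition: one scan locating the first lang/slug line, then a pure splice of
-- exactly one lang entry into the lang-free line list; same return value everywhere.

-- Shared line-level helpers (the identical subexpressions of both Pythons)
-- "line.strip().lower().startswith('lang:')"
def pvIsLang (line : String) : Bool :=
  PySem.Str.startswith (PySem.Str.lower (PySem.Str.strip line)) "lang:"
-- "'slug:' in line and ':' in line"
def pvIsSlug (line : String) : Bool :=
  PySem.Str.isIn "slug:" line && PySem.Str.isIn ":" line
-- "line[: len(line) - len(line.lstrip())]"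
def pvIndentOf (line : String) : String :=
  PySem.Str.slice line none
    (some (PySem.Str.len line - PySem.Str.len (PySem.Str.lstrip line)))
-- "f\"{indent}lang: {lang}\"" with indent taken from `line`
def pvEntry (lang line : String) : String := pvIndentOf line ++ "lang: " ++ lang

-- ===== PORT A =====
-- the body of A's for-loop, state = (new_lines, inserted)
def pvStep (lang : String) (st : List String × Bool) (line : String) : List String × Bool :=
  if pvIsLang line then
    if !st.2 then (st.1 ++ [pvEntry lang line], true) else st
  else
    let nl := st.1 ++ [line]
    if !st.2 && pvIsSlug line then (nl ++ [pvEntry lang line], true) else (nl, st.2)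

def set_lang_in_frontmatter (fm : String) (lang : String) : String :=
  let lines := (PySem.Str.split? (PySem.Str.rstrip fm) "\n").getD []
  let r := lines.foldl (pvStep lang) ([], false)
  let new_lines :=
    if !r.2 then
      if r.1 ≠ [] then
        r.1 ++ [(if PySem.Str.startswith (r.1.getLast?.getD "") " " then "  " else "") ++
                  "lang: " ++ lang]
      else r.1 ++ ["lang: " ++ lang]
    else r.1
  PySem.Str.join "\n" new_lines ++ "\n"

-- ===== PORT B =====
def set_lang_in_frontmatter_alt (fm : String) (lang : String) : String :=
  let lines := (PySem.Str.split? (PySem.Str.rstrip fm) "\n").getD []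
  let kept := lines.filter (fun l => !pvIsLang l)
  let iLang := lines.findIdx? pvIsLang
  let iSlug := lines.findIdx? (fun l => !pvIsLang l && pvIsSlug l)
  let slot : Nat × String :=
    match iLang, iSlug with
    | some i, some j =>
        if i < j then
          ((lines.take i).countP (fun l => !pvIsLang l), pvEntry lang (lines.getD i ""))
        else
          ((lines.take j).countP (fun l => !pvIsLang l) + 1, pvEntry lang (lines.getD j ""))
    | some i, none =>
        ((lines.take i).countP (fun l => !pvIsLang l), pvEntry lang (lines.getD i ""))
    | none, some j =>
        ((lines.take j).countP (fun l => !pvIsLang l) + 1, pvEntry lang (lines.getD j ""))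
    | none, none =>
        (kept.length,
         (if (kept.getLast?).elim false (fun l => PySem.Str.startswith l " ") then "  " else "")
           ++ "lang: " ++ lang)
  PySem.Str.join "\n" (kept.take slot.1 ++ [slot.2] ++ kept.drop slot.1) ++ "\n"

-- ===== PRECONDITION & SPEC =====
def Spec_set_lang_in_frontmatter (fm : String) (lang : String) (out : String) : Prop := out = set_lang_in_frontmatter_alt fm lang
instance (fm : String) (lang : String) (out : String) : Decidable (Spec_set_lang_in_frontmatter fm lang out) := by unfold Spec_set_lang_in_frontmatter; infer_instance

-- ===== CLAIM (what is proved, stated in full; the proofs are below) =====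
def Claim_equal_set_lang_in_frontmatter : Prop := ∀ (fm : String) (lang : String), Dom_set_lang_in_frontmatter fm lang → Spec_set_lang_in_frontmatter fm lang (set_lang_in_frontmatter fm lang)

-- ===== LEMMAS AND PROOFS =====

-- A's loop once `inserted` holds: it just drops the remaining lang lines
theorem pvStep_true (lang : String) (l : List String) (acc : List String) :
    l.foldl (pvStep lang) (acc, true) = (acc ++ l.filter (fun x => !pvIsLang x), true) := by
  induction l generalizing acc with
  | nil => simp
  | cons x t ih =>
    by_cases h : pvIsLang x <;>
      simp [pvStep, h, List.foldl_cons, ih]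

-- one non-event step of A's loop from an uninserted state
theorem pvStep_skip (lang : String) (acc : List String) (x : String)
    (hL : pvIsLang x = false) (hS : pvIsSlug x = false) :
    pvStep lang (acc, false) x = (acc ++ [x], false) := by
  simp [pvStep, hL, hS]

-- the accumulator factors out of A's loop
theorem pvStep_shift (lang : String) (l : List String) (acc : List String) :
    l.foldl (pvStep lang) (acc, false) =
      (acc ++ (l.foldl (pvStep lang) ([], false)).1, (l.foldl (pvStep lang) ([], false)).2) := by
  induction l generalizing acc with
  | nil => simp
  | cons x t ih =>
    by_cases hL : pvIsLang x
    · simp [pvStep, hL, List.foldl_cons, pvStep_true]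
    · by_cases hS : pvIsSlug x
      · simp [pvStep, hL, hS, List.foldl_cons, pvStep_true]
      · rw [List.foldl_cons, List.foldl_cons,
            pvStep_skip lang acc x (by simpa using hL) (by simpa using hS),
            pvStep_skip lang [] x (by simpa using hL) (by simpa using hS), ih (acc ++ [x]),
            ih ([] ++ [x])]
        simp

-- the `inserted` flag = "some lang or (non-lang) slug line occurred"
theorem pvStep_flag (lang : String) (l : List String) :
    (l.foldl (pvStep lang) ([], false)).2 =
      l.any (fun x => pvIsLang x || (!pvIsLang x && pvIsSlug x)) := by
  induction l with
  | nil => simp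
  | cons x t ih =>
    by_cases hL : pvIsLang x
    · simp [pvStep, hL, List.foldl_cons, pvStep_true]
    · by_cases hS : pvIsSlug x
      · simp [pvStep, hL, hS, List.foldl_cons, pvStep_true]
      · rw [List.foldl_cons, pvStep_skip lang [] x (by simpa using hL) (by simpa using hS),
            pvStep_shift]
        simp [hL, hS, ih]

-- with no lang and no slug line, A's loop copies the list unchanged
theorem pvStep_noev (lang : String) (l : List String)
    (h : l.any (fun x => pvIsLang x || (!pvIsLang x && pvIsSlug x)) = false) :
    l.foldl (pvStep lang) ([], false) = (l, false) := by
  induction l with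
  | nil => simp
  | cons x t ih =>
    simp only [List.any_cons, Bool.or_eq_false_iff] at h
    obtain ⟨h1, h2⟩ := h
    have hL : pvIsLang x = false := by revert h1; cases pvIsLang x <;> simp
    have hS : pvIsSlug x = false := by rw [hL] at h1; simpa using h1
    rw [List.foldl_cons, pvStep_skip lang [] x hL hS, pvStep_shift, ih h2]
    simp

-- with no lang line, the lang-filter keeps everything
theorem pvKeep_noev (l : List String)
    (h : l.any (fun x => pvIsLang x || (!pvIsLang x && pvIsSlug x)) = false) :
    l.filter (fun x => !pvIsLang x) = l := by
  rw [List.filter_eq_self]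
  intro a ha
  have := (List.any_eq_false.mp h) a ha
  revert this; cases pvIsLang a <;> simp

-- A's full line list (loop + fallback), as the port computes it
def pvAList (lang : String) (l : List String) : List String :=
  let r := l.foldl (pvStep lang) ([], false)
  if !r.2 then
    if r.1 ≠ [] then
      r.1 ++ [(if PySem.Str.startswith (r.1.getLast?.getD "") " " then "  " else "") ++
                "lang: " ++ lang]
    else r.1 ++ ["lang: " ++ lang]
  else r.1

-- B's full line list (slot + splice), as the port computes it
def pvBList (lang : String) (l : List String) : List String :=
  let kept := l.filter (fun x => !pvIsLang x)
  let slot : Nat × String :=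
    match l.findIdx? pvIsLang, l.findIdx? (fun x => !pvIsLang x && pvIsSlug x) with
    | some i, some j =>
        if i < j then ((l.take i).countP (fun x => !pvIsLang x), pvEntry lang (l.getD i ""))
        else ((l.take j).countP (fun x => !pvIsLang x) + 1, pvEntry lang (l.getD j ""))
    | some i, none => ((l.take i).countP (fun x => !pvIsLang x), pvEntry lang (l.getD i ""))
    | none, some j => ((l.take j).countP (fun x => !pvIsLang x) + 1, pvEntry lang (l.getD j ""))
    | none, none =>
        (kept.length,
         (if (kept.getLast?).elim false (fun x => PySem.Str.startswith x " ") then "  " else "")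
           ++ "lang: " ++ lang)
  kept.take slot.1 ++ [slot.2] ++ kept.drop slot.1

-- B on a cons whose head is no event, when the tail contains an event: the head is copied
theorem pvB_cons_shift (lang : String) (x : String) (t : List String)
    (hL : pvIsLang x = false) (hS : pvIsSlug x = false)
    (hev : t.findIdx? pvIsLang ≠ none ∨ t.findIdx? (fun y => !pvIsLang y && pvIsSlug y) ≠ none) :
    pvBList lang (x :: t) = x :: pvBList lang t := by
  unfold pvBList
  rw [List.findIdx?_cons, List.findIdx?_cons, List.filter_cons_of_pos (by simp [hL])]
  simp only [hL, hS, Bool.false_eq_true, if_false]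
  cases hi : t.findIdx? pvIsLang with
  | none =>
    cases hj : t.findIdx? (fun y => !pvIsLang y && pvIsSlug y) with
    | none => simp [hi, hj] at hev
    | some j =>
      simp [List.take_succ_cons, hL, List.drop_succ_cons]
  | some i =>
    cases hj : t.findIdx? (fun y => !pvIsLang y && pvIsSlug y) with
    | none =>
      simp [List.take_succ_cons, hL, List.drop_succ_cons]
    | some j =>
      by_cases hij : i < j <;>
        simp [hij, List.take_succ_cons, hL, List.drop_succ_cons]

theorem pvMain (lang : String) (l : List String) : pvAList lang l = pvBList lang l := by
  induction l with
  | nil => simp [pvAList, pvBList, String.empty_append]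
  | cons x t ih =>
    by_cases hL : pvIsLang x
    · -- first line is a lang line: replaced in place, rest filtered
      have hA : pvAList lang (x :: t) = pvEntry lang x :: t.filter (fun y => !pvIsLang y) := by
        unfold pvAList
        rw [List.foldl_cons, show pvStep lang ([], false) x = ([pvEntry lang x], true) from by
              simp [pvStep, hL],
            pvStep_true]
        simp
      rw [hA]
      unfold pvBList
      rw [List.findIdx?_cons, List.findIdx?_cons]
      simp only [hL, ite_true, Bool.not_true, Bool.false_and]
      cases hj : t.findIdx? (fun y => !pvIsLang y && pvIsSlug y) <;>
        simp [List.filter_cons_of_neg, hL]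
    · by_cases hS : pvIsSlug x
      · -- first line is a slug line: entry spliced right after it
        have hA : pvAList lang (x :: t) =
            x :: pvEntry lang x :: t.filter (fun y => !pvIsLang y) := by
          unfold pvAList
          rw [List.foldl_cons, show pvStep lang ([], false) x = ([x, pvEntry lang x], true) from by
                simp [pvStep, hL, hS],
              pvStep_true]
          simp
        rw [hA]
        unfold pvBList
        rw [List.findIdx?_cons, List.findIdx?_cons]
        simp only [hL, hS, Bool.not_false, Bool.true_and, ite_true]
        cases hi : t.findIdx? pvIsLang <;>
          simp [List.filter_cons_of_pos, hL]
      · -- first line is no event: it is copied by both sides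
        have tailcase : (t.foldl (pvStep lang) ([], false)).2 = true →
            (t.findIdx? pvIsLang ≠ none ∨
             t.findIdx? (fun y => !pvIsLang y && pvIsSlug y) ≠ none) →
            pvAList lang (x :: t) = pvBList lang (x :: t) := by
          intro hr2 hevor
          have hAt : pvAList lang t = (t.foldl (pvStep lang) ([], false)).1 := by
            simp only [pvAList]; rw [hr2]; simp
          have hA : pvAList lang (x :: t) = x :: (t.foldl (pvStep lang) ([], false)).1 := by
            simp only [pvAList]
            rw [List.foldl_cons, pvStep_skip lang [] x (by simpa using hL) (by simpa using hS),
                pvStep_shift, hr2]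
            simp
          rw [hA, ← hAt, ih,
              pvB_cons_shift lang x t (by simpa using hL) (by simpa using hS) hevor]
        rcases hev : t.findIdx? pvIsLang with _ | i
        · rcases hev2 : t.findIdx? (fun y => !pvIsLang y && pvIsSlug y) with _ | j
          · -- no event anywhere: fallback appends at the end
            have hanyL : t.any pvIsLang = false := by
              have := List.findIdx?_isSome (p := pvIsLang) (xs := t)
              rw [hev] at this; simpa using this.symm
            have hanyS : t.any (fun y => !pvIsLang y && pvIsSlug y) = false := by
              have := List.findIdx?_isSome (p := fun y => !pvIsLang y && pvIsSlug y) (xs := t)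
              rw [hev2] at this; simpa using this.symm
            have hno : t.any (fun y => pvIsLang y || (!pvIsLang y && pvIsSlug y)) = false := by
              rw [List.any_eq_false]
              intro a ha
              have h1 := (List.any_eq_false.mp hanyL) a ha
              have h2 := (List.any_eq_false.mp hanyS) a ha
              simp only [Bool.or_eq_true, not_or]
              exact ⟨h1, h2⟩
            have hkeep := pvKeep_noev t hno
            unfold pvAList
            rw [List.foldl_cons, pvStep_skip lang [] x (by simpa using hL) (by simpa using hS),
                pvStep_shift, pvStep_noev lang t hno]
            unfold pvBList
            rw [List.findIdx?_cons, List.findIdx?_cons]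
            simp only [hL, hS, Bool.not_false, Bool.true_and, hev, hev2, Option.map_none]
            rw [List.filter_cons_of_pos (by simp [hL]), hkeep]
            rcases hzl : (x :: t).getLast? with _ | z
            · simp at hzl
            · simp [hzl, List.take_length, List.drop_length]
          · -- tail has a slug event
            refine tailcase ?_ (Or.inr (by simp [hev2]))
            rw [pvStep_flag, List.any_eq_true]
            have : t.any (fun y => !pvIsLang y && pvIsSlug y) = true := by
              have := List.findIdx?_isSome (p := fun y => !pvIsLang y && pvIsSlug y) (xs := t)
              rw [hev2] at this; simpa using this.symm
            obtain ⟨a, ha, hpa⟩ := List.any_eq_true.mp this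
            exact ⟨a, ha, by simp_all⟩
        · -- tail has a lang event
          refine tailcase ?_ (Or.inl (by simp [hev]))
          rw [pvStep_flag, List.any_eq_true]
          have : t.any pvIsLang = true := by
            have := List.findIdx?_isSome (p := pvIsLang) (xs := t)
            rw [hev] at this; simpa using this.symm
          obtain ⟨a, ha, hpa⟩ := List.any_eq_true.mp this
          exact ⟨a, ha, by simp [hpa]⟩

-- ===== VERDICT (by name: the statement is the Claim_ definition above) =====
theorem set_lang_in_frontmatter_spec : Claim_equal_set_lang_in_frontmatter := by
  intro fm lang _
  unfold Spec_set_lang_in_frontmatter set_lang_in_frontmatter set_lang_in_frontmatter_alt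
  have := pvMain lang ((PySem.Str.split? (PySem.Str.rstrip fm) "\n").getD [])
  simp only [pvAList, pvBList] at this
  exact congrArg (fun z => PySem.Str.join "\n" z ++ "\n") this
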